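-- pv_equiv track=rewrite | github.com/shellphish/artiphishell | components/codeql/guest_content/make_strings_dict.py | libfuzzer_dict_encode
-- ===== SOURCE A (Python) =====
-- import string
--
-- allowed_chars = string.ascii_letters + string.digits + r"""!#$%&()*+,-./:;<=>?@[]^_{|}~""" + ' '
--
-- def libfuzzer_dict_encode(s):
--     result = '"'
--     for c in s:
--         if c == '"':
--             result += '\\"'
--         elif c == '\\':
--             result += '\\\\'
--         elif c in allowed_chars:
--             result += c
--         else:
--             result += '\\x' + f'{ord(c):02x}'
--     result += '"'
--     return result
-- ===== SOURCE B (Python) =====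
-- import string
--
-- allowed_chars = string.ascii_letters + string.digits + r"""!#$%&()*+,-./:;<=>?@[]^_{|}~""" + ' '
--
-- def libfuzzer_dict_encode(s):
--     parts = ['"']
--     i, n = 0, len(s)
--     while i < n:
--         j = i
--         while j < n and s[j] in allowed_chars:
--             j += 1
--         parts.append(s[i:j])          # copy a maximal run of allowed chars as one slice
--         if j < n:
--             c = s[j]
--             if c == '"':
--                 parts.append('\\"')
--             elif c == '\\':
--                 parts.append('\\\\')
--             else:
--                 parts.append('\\x%02x' % ord(c))
--             j += 1
--         i = j
--     parts.append('"')
--     return ''.join(parts)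
-- ===== Notes on version B (the rewrite author's own statement) =====
-- stated objective: alternative
-- what changed: Replaces A's per-character if/elif chain with string concatenation by a span-scanning algorithm: an index loop finds each maximal run of allowed characters, appends it as one slice, escapes the single blocking character, and joins the collected parts once at the end.
import Mathlib
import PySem

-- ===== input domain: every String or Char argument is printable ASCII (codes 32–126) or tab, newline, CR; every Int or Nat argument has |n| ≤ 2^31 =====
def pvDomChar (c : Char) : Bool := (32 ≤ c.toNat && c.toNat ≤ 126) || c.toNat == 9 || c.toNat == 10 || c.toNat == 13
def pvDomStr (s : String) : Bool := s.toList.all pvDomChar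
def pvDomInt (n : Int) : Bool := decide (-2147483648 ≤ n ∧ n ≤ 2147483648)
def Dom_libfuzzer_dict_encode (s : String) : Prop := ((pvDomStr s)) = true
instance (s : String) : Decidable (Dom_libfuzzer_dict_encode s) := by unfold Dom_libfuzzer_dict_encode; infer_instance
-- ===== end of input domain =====

-- B replaces A's per-character branch chain and string accumulator by a span-scanning loop
-- that copies maximal runs of allowed characters as whole slices and escapes the blocking
-- character between runs (objective: alternative); return values proved equal.

-- allowed_chars = string.ascii_letters + string.digits + r"""!#$%&()*+,-./:;<=>?@[]^_{|}~""" + ' '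
def allowedChars : List Char :=
  "abcdefghijklmnopqrstuvwxyzABCDEFGHIJKLMNOPQRSTUVWXYZ0123456789!#$%&()*+,-./:;<=>?@[]^_{|}~ ".toList

-- f'{n:02x}' / '%02x' % n: lowercase hex digits of n, zero-padded to width 2
-- (both Pythons compute this same format; exact for every Nat codepoint)
def hexDigit (n : Nat) : Char := if n < 10 then Char.ofNat (48 + n) else Char.ofNat (87 + n)

def hexChars : Nat → List Char
  | 0 => []
  | n + 1 => hexChars ((n + 1) / 16) ++ [hexDigit ((n + 1) % 16)]
decreasing_by exact Nat.div_lt_self (Nat.succ_pos n) (by norm_num)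

def hex02 (n : Nat) : List Char :=
  let ds := if n = 0 then ['0'] else hexChars n
  if ds.length < 2 then '0' :: ds else ds

-- ===== PORT A =====
-- 'c in allowed_chars' with c a single character = list membership of the char (exact here)
def libfuzzer_dict_encode (s : String) : String :=
  let result := s.toList.foldl (fun (result : List Char) c =>
    if c = '"' then result ++ ['\\', '"']
    else if c = '\\' then result ++ ['\\', '\\']
    else if c ∈ allowedChars then result ++ [c]
    else result ++ '\\' :: 'x' :: hex02 c.toNat) ['"']
  String.ofList (result ++ ['"'])

-- ===== PORT B =====
-- inner while: 'while j < n and s[j] in allowed_chars: j += 1'; fuel (= n - j at entry)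
-- only makes the loop total, it never changes the computed value
def spanGo : Nat → List Char → Nat → Nat
  | 0, _, j => j
  | fuel + 1, cs, j =>
    if h : j < cs.length then
      if cs[j] ∈ allowedChars then spanGo fuel cs (j + 1) else j
    else j

def spanEnd (cs : List Char) (j : Nat) : Nat := spanGo (cs.length - j) cs j

-- outer while loop of B, carrying the parts list; the local j = spanEnd cs i is inlined;
-- s[i:j] with 0 ≤ i ≤ j ≤ n is exactly (cs.drop i).take (j - i); fuel (= n - i at entry)
-- only makes the loop total
def encodeGo : Nat → List Char → Nat → List (List Char) → List (List Char)
  | 0, _, _, parts => parts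
  | fuel + 1, cs, i, parts =>
    if hi : i < cs.length then
      if hj : spanEnd cs i < cs.length then
        encodeGo fuel cs (spanEnd cs i + 1)
          ((parts ++ [(cs.drop i).take (spanEnd cs i - i)]) ++
            [if cs[spanEnd cs i] = '"' then ['\\', '"']
             else if cs[spanEnd cs i] = '\\' then ['\\', '\\']
             else '\\' :: 'x' :: hex02 (cs[spanEnd cs i]).toNat])
      else encodeGo fuel cs (spanEnd cs i) (parts ++ [(cs.drop i).take (spanEnd cs i - i)])
    else parts

def libfuzzer_dict_encode_alt (s : String) : String :=
  String.ofList ((encodeGo s.toList.length s.toList 0 [['"']] ++ [['"']]).flatten)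

-- ===== PRECONDITION & SPEC =====
def Spec_libfuzzer_dict_encode (s : String) (out : String) : Prop := out = libfuzzer_dict_encode_alt s
instance (s : String) (out : String) : Decidable (Spec_libfuzzer_dict_encode s out) := by unfold Spec_libfuzzer_dict_encode; infer_instance

-- ===== CLAIM (what is proved, stated in full; the proofs are below) =====
def Claim_equal_libfuzzer_dict_encode : Prop := ∀ (s : String), Dom_libfuzzer_dict_encode s → Spec_libfuzzer_dict_encode s (libfuzzer_dict_encode s)

-- ===== LEMMAS AND PROOFS =====

-- A's per-character branch chain as a function
def enc (c : Char) : List Char :=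
  if c = '"' then ['\\', '"']
  else if c = '\\' then ['\\', '\\']
  else if c ∈ allowedChars then [c]
  else '\\' :: 'x' :: hex02 c.toNat

theorem enc_of_allowed (c : Char) (h : c ∈ allowedChars) : enc c = [c] := by
  have h1 : c ≠ '"' := by rintro rfl; revert h; decide
  have h2 : c ≠ '\\' := by rintro rfl; revert h; decide
  simp [enc, h1, h2, h]

theorem spanGo_ge (fuel : Nat) (cs : List Char) (j : Nat) : j ≤ spanGo fuel cs j := by
  induction fuel generalizing j with
  | zero => exact le_refl j
  | succ fuel ih =>
    simp only [spanGo]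
    split
    · split
      · exact le_trans (Nat.le_succ j) (ih (j + 1))
      · exact le_refl j
    · exact le_refl j

theorem spanGo_le (fuel : Nat) (cs : List Char) (j : Nat) (h : j ≤ cs.length) :
    spanGo fuel cs j ≤ cs.length := by
  induction fuel generalizing j with
  | zero => exact h
  | succ fuel ih =>
    simp only [spanGo]
    split
    · split
      · exact ih (j + 1) (by omega)
      · exact h
    · exact h

-- with enough fuel, the char at the returned position (when in range) is not allowed
theorem spanGo_stop (fuel : Nat) (cs : List Char) (j : Nat) (hf : cs.length - j ≤ fuel) :
    ∀ (h : spanGo fuel cs j < cs.length), cs[spanGo fuel cs j] ∉ allowedChars := by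
  induction fuel generalizing j with
  | zero => intro h; simp only [spanGo] at h; omega
  | succ fuel ih =>
    intro h
    by_cases hlt : j < cs.length
    · by_cases hall : cs[j] ∈ allowedChars
      · have heq : spanGo (fuel + 1) cs j = spanGo fuel cs (j + 1) := by
          simp [spanGo, hlt, hall]
        simp only [heq] at h ⊢
        exact ih (j + 1) (by omega) h
      · have heq : spanGo (fuel + 1) cs j = j := by simp [spanGo, hlt, hall]
        simp only [heq]
        exact hall
    · have heq : spanGo (fuel + 1) cs j = j := by simp [spanGo, hlt]
      rw [heq] at h
      exact absurd h hlt

-- with enough fuel, the flatMap of enc over the tail splits at the span end: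
-- the run is copied verbatim
theorem spanGo_split (fuel : Nat) (cs : List Char) (j : Nat) (hf : cs.length - j ≤ fuel) :
    (cs.drop j).flatMap enc
      = (cs.drop j).take (spanGo fuel cs j - j) ++ (cs.drop (spanGo fuel cs j)).flatMap enc := by
  induction fuel generalizing j with
  | zero => simp [spanGo]
  | succ fuel ih =>
    simp only [spanGo]
    split
    · rename_i hlt
      split
      · rename_i hall
        have hge := spanGo_ge fuel cs (j + 1)
        have hdrop : cs.drop j = cs[j] :: cs.drop (j + 1) := List.drop_eq_getElem_cons hlt
        rw [hdrop]
        simp only [List.flatMap_cons, enc_of_allowed _ hall]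
        have hsub : spanGo fuel cs (j + 1) - j = (spanGo fuel cs (j + 1) - (j + 1)) + 1 := by
          omega
        rw [hsub, List.take_succ_cons, ih (j + 1) (by omega)]
        simp
      · simp
    · simp

theorem spanEnd_ge (cs : List Char) (j : Nat) : j ≤ spanEnd cs j := spanGo_ge _ cs j

theorem spanEnd_le (cs : List Char) (j : Nat) (h : j ≤ cs.length) :
    spanEnd cs j ≤ cs.length := spanGo_le _ cs j h

theorem spanEnd_stop (cs : List Char) (j : Nat) (h : spanEnd cs j < cs.length) :
    cs[spanEnd cs j] ∉ allowedChars := spanGo_stop _ cs j (le_refl _) h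

theorem spanEnd_split (cs : List Char) (j : Nat) :
    (cs.drop j).flatMap enc
      = (cs.drop j).take (spanEnd cs j - j) ++ (cs.drop (spanEnd cs j)).flatMap enc :=
  spanGo_split _ cs j (le_refl _)

-- loop invariant: with enough fuel the final flattened parts are the parts so far
-- plus enc over the rest
theorem encodeGo_flatten (fuel : Nat) (cs : List Char) (i : Nat) (parts : List (List Char))
    (hf : cs.length - i ≤ fuel) :
    (encodeGo fuel cs i parts).flatten = parts.flatten ++ (cs.drop i).flatMap enc := by
  induction fuel generalizing i parts with
  | zero =>
    simp only [encodeGo]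
    have : cs.length ≤ i := by omega
    simp [List.drop_eq_nil_of_le this]
  | succ fuel ih =>
    simp only [encodeGo]
    split
    · rename_i hi
      have hge := spanEnd_ge cs i
      have hle := spanEnd_le cs i (Nat.le_of_lt hi)
      split
      · rename_i hj
        rw [ih (spanEnd cs i + 1) _ (by omega), spanEnd_split cs i,
            List.drop_eq_getElem_cons hj]
        have henc : (if cs[spanEnd cs i] = '"' then ['\\', '"']
             else if cs[spanEnd cs i] = '\\' then ['\\', '\\']
             else '\\' :: 'x' :: hex02 (cs[spanEnd cs i]).toNat) = enc cs[spanEnd cs i] := by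
          simp [enc, spanEnd_stop cs i hj]
        simp [henc]
        rw [List.drop_eq_getElem_cons hj, List.flatMap_cons]
      · rename_i hj
        have hje : spanEnd cs i = cs.length := by omega
        rw [ih (spanEnd cs i) _ (by omega), spanEnd_split cs i, hje]
        simp
    · rename_i hi
      simp [List.drop_eq_nil_of_le (Nat.le_of_not_lt hi)]

-- ===== VERDICT (by name: the statement is the Claim_ definition above) =====
theorem libfuzzer_dict_encode_spec : Claim_equal_libfuzzer_dict_encode := by
  intro s _
  unfold Spec_libfuzzer_dict_encode libfuzzer_dict_encode libfuzzer_dict_encode_alt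
  have hstep : (fun (result : List Char) c =>
      if c = '"' then result ++ ['\\', '"']
      else if c = '\\' then result ++ ['\\', '\\']
      else if c ∈ allowedChars then result ++ [c]
      else result ++ '\\' :: 'x' :: hex02 c.toNat)
    = (fun (result : List Char) c => result ++ enc c) := by
    funext r c; simp only [enc]; split_ifs <;> rfl
  rw [hstep, PySem.List.foldl_append_eq_flatMap]
  rw [List.flatten_append, encodeGo_flatten s.toList.length s.toList 0 [['"']] (by omega)]
  simp
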